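-- pv_equiv track=rewrite | github.com/EthanWalkerSV/ReinforceTrade | trading/websocket_client.py | _extract_symbol_from_stream
-- ===== SOURCE A (Python) =====
-- def _extract_symbol_from_stream(stream: str) -> str:
--     """Extract symbol from stream name"""
--     # stream format: btcusdt@ticker
--     symbol_part = stream.replace('@ticker', '')
--     # Convert back to standard format: BTC/USDT
--     for i in range(len(symbol_part) - 1, 0, -1):
--         if symbol_part[i:].upper() in ['USDT', 'USD', 'BUSD', 'USDC']:
--             base = symbol_part[:i]
--             quote = symbol_part[i:]
--             return f"{base.upper()}/{quote.upper()}"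
--     return symbol_part.upper()
-- ===== SOURCE B (Python) =====
-- def _extract_symbol_from_stream(stream: str) -> str:
--     """Extract symbol from stream name"""
--     # stream format: btcusdt@ticker
--     symbol_part = stream.replace('@ticker', '')
--     upper = symbol_part.upper()
--     n = len(upper)
--     # Decide the quote length directly: 'USD' first (shortest suffix wins, as
--     # in the positional scan), then the three 4-char quotes; the quote must be
--     # a proper suffix (cut < n).
--     if n > 3 and upper[-3:] == 'USD':
--         cut = 3
--     elif n > 4 and upper[-4:] in ('USDT', 'BUSD', 'USDC'):
--         cut = 4
--     else:
--         return upper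
--     return f"{upper[:-cut]}/{upper[-cut:]}"
-- ===== Notes on version B (the rewrite author's own statement) =====
-- stated objective: faster
-- what changed: B replaces A's positional scan (which uppercases a fresh suffix slice at every index from the end) by a loop-free decision chain: uppercase once, test the 3-char suffix for USD, else the 4-char suffix against the three 4-char quotes, then split at the decided cut.
import Mathlib
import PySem

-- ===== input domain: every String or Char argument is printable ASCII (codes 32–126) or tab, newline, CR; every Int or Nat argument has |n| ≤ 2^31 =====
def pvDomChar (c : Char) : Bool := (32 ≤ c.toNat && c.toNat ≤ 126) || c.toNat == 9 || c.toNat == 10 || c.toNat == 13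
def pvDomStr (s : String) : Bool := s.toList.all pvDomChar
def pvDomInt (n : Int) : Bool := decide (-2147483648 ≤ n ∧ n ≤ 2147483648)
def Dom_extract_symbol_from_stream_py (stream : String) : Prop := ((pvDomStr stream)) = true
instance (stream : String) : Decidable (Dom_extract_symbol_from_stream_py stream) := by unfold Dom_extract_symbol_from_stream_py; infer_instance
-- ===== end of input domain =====

-- B replaces A's positional scan by a loop-free decision chain on the two
-- possible suffix lengths (3 then 4) of the uppercased string — faster.

-- ===== PORT A =====
-- the literal list ['USDT', 'USD', 'BUSD', 'USDC'] from A
def pvQuotesA : List (List Char) := ["USDT".toList, "USD".toList, "BUSD".toList, "USDC".toList]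

-- the for-loop of A over range(len(symbol_part)-1, 0, -1) with early return
def pvLoopA (sp : List Char) : List Int → List Char
  | [] => PySem.Chars.upper sp
  | i :: rest =>
    if PySem.Chars.upper (PySem.Chars.slice sp (some i) none) ∈ pvQuotesA then
      PySem.Chars.upper (PySem.Chars.slice sp none (some i)) ++ ['/'] ++
        PySem.Chars.upper (PySem.Chars.slice sp (some i) none)
    else pvLoopA sp rest

def extract_symbol_from_stream_py (stream : String) : String :=
  let sp := PySem.Chars.replace stream.toList "@ticker".toList []
  String.ofList (pvLoopA sp (PySem.List.pyRange ((PySem.Chars.len sp : Int) - 1) 0 (-1)))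

-- ===== PORT B =====
-- B's shared final return f"{upper[:-cut]}/{upper[-cut:]}"
def pvJoin (up : List Char) (cut : Int) : List Char :=
  PySem.Chars.slice up none (some (-cut)) ++ ['/'] ++ PySem.Chars.slice up (some (-cut)) none

-- B's decision chain on the uppercased symbol part
def pvAlt (up : List Char) : List Char :=
  let n : Int := PySem.Chars.len up
  if 3 < n ∧ PySem.Chars.slice up (some (-3)) none = "USD".toList then
    pvJoin up 3
  else if 4 < n ∧ PySem.Chars.slice up (some (-4)) none ∈ ["USDT".toList, "BUSD".toList, "USDC".toList] then
    pvJoin up 4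
  else up

def extract_symbol_from_stream_py_alt (stream : String) : String :=
  String.ofList (pvAlt (PySem.Chars.upper (PySem.Chars.replace stream.toList "@ticker".toList [])))

-- ===== PRECONDITION & SPEC =====
def Spec_extract_symbol_from_stream_py (stream : String) (out : String) : Prop := out = extract_symbol_from_stream_py_alt stream
instance (stream : String) (out : String) : Decidable (Spec_extract_symbol_from_stream_py stream out) := by unfold Spec_extract_symbol_from_stream_py; infer_instance

-- ===== CLAIM (what is proved, stated in full; the proofs are below) =====
def Claim_equal_extract_symbol_from_stream_py : Prop := ∀ (stream : String), Dom_extract_symbol_from_stream_py stream → Spec_extract_symbol_from_stream_py stream (extract_symbol_from_stream_py stream)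

-- ===== LEMMAS AND PROOFS =====

theorem pv_upper_drop (sp : List Char) (k : Nat) :
    PySem.Chars.upper (sp.drop k) = (PySem.Chars.upper sp).drop k := by
  simp [PySem.Chars.upper, List.map_drop]

theorem pv_upper_take (sp : List Char) (k : Nat) :
    PySem.Chars.upper (sp.take k) = (PySem.Chars.upper sp).take k := by
  simp [PySem.Chars.upper, List.map_take]

theorem pv_upper_length (sp : List Char) : (PySem.Chars.upper sp).length = sp.length := by
  simp [PySem.Chars.upper]

-- condition in A's loop, rewritten through the uppercased string
theorem pv_condA (sp : List Char) (k : Nat) :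
    PySem.Chars.upper (PySem.Chars.slice sp (some (k : Int)) none) = (PySem.Chars.upper sp).drop k := by
  rw [PySem.Chars.slice_eq_listSlice, PySem.List.slice_from_natCast, pv_upper_drop]

-- the four quote literals, spelled out
theorem pvQuotesA_eq : pvQuotesA = [['U','S','D','T'],['U','S','D'],['B','U','S','D'],['U','S','D','C']] := by decide

-- A's membership test can only fire on suffixes of length 3 or 4
theorem pv_condA_false (sp : List Char) (k : Nat) (_hk : k ≤ sp.length)
    (h : sp.length - k ≠ 3 ∧ sp.length - k ≠ 4) :
    PySem.Chars.upper (PySem.Chars.slice sp (some (k : Int)) none) ∉ pvQuotesA := by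
  rw [pv_condA, pvQuotesA_eq]
  intro hmem
  have hlen : (List.drop k (PySem.Chars.upper sp)).length = sp.length - k := by
    simp [pv_upper_length]
  simp only [List.mem_cons, List.not_mem_nil, or_false] at hmem
  obtain ⟨h3, h4⟩ := h
  rcases hmem with he | he | he | he <;>
    (have hc := congrArg List.length he; rw [hlen] at hc; simp at hc; omega)

-- skipping a prefix of indices on which the test is false
theorem pv_loopA_skip (sp : List Char) (L1 L2 : List Int)
    (h : ∀ i ∈ L1, PySem.Chars.upper (PySem.Chars.slice sp (some i) none) ∉ pvQuotesA) :
    pvLoopA sp (L1 ++ L2) = pvLoopA sp L2 := by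
  induction L1 with
  | nil => rfl
  | cons i t ih =>
    have hi := h i (by simp)
    simp only [List.cons_append, pvLoopA, if_neg hi]
    exact ih (fun j hj => h j (by simp [hj]))

theorem pv_loopA_all_false (sp : List Char) (L : List Int)
    (h : ∀ i ∈ L, PySem.Chars.upper (PySem.Chars.slice sp (some i) none) ∉ pvQuotesA) :
    pvLoopA sp L = PySem.Chars.upper sp := by
  have := pv_loopA_skip sp L [] h
  simpa using this

-- splitting a countdown range
theorem pv_pyRange_neg_one_append (a b c : Int) (h1 : c ≤ b) (h2 : b ≤ a) :
    PySem.List.pyRange a c (-1) = PySem.List.pyRange a b (-1) ++ PySem.List.pyRange b c (-1) := by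
  rw [PySem.List.pyRange_neg_one_eq_reverse, PySem.List.pyRange_neg_one_eq_reverse,
    PySem.List.pyRange_neg_one_eq_reverse,
    PySem.List.pyRange_one_append (c+1) (b+1) (a+1) (by omega) (by omega), List.reverse_append]

-- step lemmas for A's loop
theorem pv_loopA_cons_true (sp : List Char) (i : Int) (L : List Int)
    (h : PySem.Chars.upper (PySem.Chars.slice sp (some i) none) ∈ pvQuotesA) :
    pvLoopA sp (i :: L) =
      PySem.Chars.upper (PySem.Chars.slice sp none (some i)) ++ ['/'] ++
        PySem.Chars.upper (PySem.Chars.slice sp (some i) none) := by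
  simp only [pvLoopA]
  rw [if_pos h]

theorem pv_loopA_cons_false (sp : List Char) (i : Int) (L : List Int)
    (h : PySem.Chars.upper (PySem.Chars.slice sp (some i) none) ∉ pvQuotesA) :
    pvLoopA sp (i :: L) = pvLoopA sp L := by
  simp only [pvLoopA]
  rw [if_neg h]

-- B's negative-index slices, as take/drop of the uppercased string
theorem pv_slice_from3 (up : List Char) :
    PySem.Chars.slice up (some (-3)) none = up.drop (up.length - 3) := by
  rw [PySem.Chars.slice_eq_listSlice, PySem.List.slice_from_neg_ofNat up 3 (by omega)]

theorem pv_slice_from4 (up : List Char) :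
    PySem.Chars.slice up (some (-4)) none = up.drop (up.length - 4) := by
  rw [PySem.Chars.slice_eq_listSlice, PySem.List.slice_from_neg_ofNat up 4 (by omega)]

theorem pv_slice_to3 (up : List Char) :
    PySem.Chars.slice up none (some (-3)) = up.take (up.length - 3) := by
  rw [PySem.Chars.slice_eq_listSlice, PySem.List.slice_to_neg_ofNat up 3 (by omega)]

theorem pv_slice_to4 (up : List Char) :
    PySem.Chars.slice up none (some (-4)) = up.take (up.length - 4) := by
  rw [PySem.Chars.slice_eq_listSlice, PySem.List.slice_to_neg_ofNat up 4 (by omega)]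

-- the main equivalence on the shared symbol_part
theorem pv_main (sp : List Char) :
    pvLoopA sp (PySem.List.pyRange ((PySem.Chars.len sp : Int) - 1) 0 (-1)) =
      pvAlt (PySem.Chars.upper sp) := by
  have hlen : PySem.Chars.len sp = sp.length := by simp
  have hul : (PySem.Chars.upper sp).length = sp.length := pv_upper_length sp
  have hnl : PySem.Chars.len (PySem.Chars.upper sp) = (sp.length : Int) := by
    simp [hul]
  rw [hlen]
  by_cases h4 : 4 ≤ sp.length
  case neg =>
    -- symbol_part shorter than 4: no suffix can match, both return upper(sp)
    rw [pv_loopA_all_false sp _ (by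
      intro i hi
      rw [PySem.List.mem_pyRange_neg_one] at hi
      have hi' : i = ((i.toNat : Nat) : Int) := by omega
      rw [hi']
      exact pv_condA_false sp i.toNat (by omega) (by omega))]
    unfold pvAlt
    rw [if_neg (by rw [hnl]; rintro ⟨hl, -⟩; omega),
      if_neg (by rw [hnl]; rintro ⟨hl, -⟩; omega)]
  case pos =>
    -- skip indices above len-3 (suffix of length 1 or 2)
    rw [pv_pyRange_neg_one_append ((sp.length : Int) - 1) ((sp.length : Int) - 3) 0
      (by omega) (by omega)]
    rw [pv_loopA_skip sp _ _ (by
      intro i hi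
      rw [PySem.List.mem_pyRange_neg_one] at hi
      have hi' : i = ((i.toNat : Nat) : Int) := by omega
      rw [hi']
      exact pv_condA_false sp i.toNat (by omega) (by omega))]
    rw [PySem.List.pyRange_neg_one_cons (by omega : (0 : Int) < (sp.length : Int) - 3)]
    have e3 : (sp.length : Int) - 3 = ((sp.length - 3 : Nat) : Int) := by omega
    rw [e3]
    have ht3 : PySem.Chars.upper (PySem.Chars.slice sp (some ((sp.length - 3 : Nat) : Int)) none)
        = (PySem.Chars.upper sp).drop (sp.length - 3) := pv_condA sp (sp.length - 3)
    have hlt3 : ((PySem.Chars.upper sp).drop (sp.length - 3)).length = 3 := by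
      simp [hul]; omega
    have hB3 : PySem.Chars.slice (PySem.Chars.upper sp) (some (-3)) none
        = (PySem.Chars.upper sp).drop (sp.length - 3) := by
      rw [pv_slice_from3, hul]
    have hB4 : PySem.Chars.slice (PySem.Chars.upper sp) (some (-4)) none
        = (PySem.Chars.upper sp).drop (sp.length - 4) := by
      rw [pv_slice_from4, hul]
    by_cases hUSD : (PySem.Chars.upper sp).drop (sp.length - 3) = ['U','S','D']
    case pos =>
      -- the 3-char suffix is USD: both return base/USD
      rw [pv_loopA_cons_true sp _ _ (by rw [ht3, hUSD, pvQuotesA_eq]; simp)]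
      unfold pvAlt
      rw [if_pos ⟨by rw [hnl]; omega, by rw [hB3]; exact hUSD⟩]
      unfold pvJoin
      rw [pv_slice_to3, hul, hB3, ht3, hUSD,
        PySem.Chars.slice_eq_listSlice, PySem.List.slice_to_natCast, pv_upper_take]
    case neg =>
      -- 3-char suffix is not USD: skip it in A, first branch false in B
      rw [pv_loopA_cons_false sp _ _ (by
        rw [ht3, pvQuotesA_eq]
        intro hm
        simp only [List.mem_cons, List.not_mem_nil, or_false] at hm
        rcases hm with he | he | he | he
        · exact absurd (by rw [he] at hlt3; simp at hlt3) (by omega)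
        · exact hUSD he
        · exact absurd (by rw [he] at hlt3; simp at hlt3) (by omega)
        · exact absurd (by rw [he] at hlt3; simp at hlt3) (by omega))]
      unfold pvAlt
      rw [if_neg (by rintro ⟨-, hs⟩; rw [hB3] at hs; exact hUSD (by simpa using hs))]
      have e4 : ((sp.length - 3 : Nat) : Int) - 1 = ((sp.length - 4 : Nat) : Int) := by omega
      rw [e4]
      by_cases h5 : 5 ≤ sp.length
      case neg =>
        -- len = 4: A's range is exhausted and no 4-char quote is a proper suffix
        have : ((sp.length - 4 : Nat) : Int) = 0 := by omega
        rw [this, PySem.List.pyRange_neg_one_eq_nil (by omega)]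
        rw [if_neg (by rw [hnl]; rintro ⟨hl, -⟩; omega)]
        rfl
      case pos =>
        rw [PySem.List.pyRange_neg_one_cons (by omega : (0 : Int) < ((sp.length - 4 : Nat) : Int))]
        have ht4 : PySem.Chars.upper (PySem.Chars.slice sp (some ((sp.length - 4 : Nat) : Int)) none)
            = (PySem.Chars.upper sp).drop (sp.length - 4) := pv_condA sp (sp.length - 4)
        have hlt4 : ((PySem.Chars.upper sp).drop (sp.length - 4)).length = 4 := by
          simp [hul]; omega
        have hABtake : PySem.Chars.upper (PySem.Chars.slice sp none (some ((sp.length - 4 : Nat) : Int)))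
            = (PySem.Chars.upper sp).take (sp.length - 4) := by
          rw [PySem.Chars.slice_eq_listSlice, PySem.List.slice_to_natCast, pv_upper_take]
        have hBjoin : pvJoin (PySem.Chars.upper sp) 4
            = (PySem.Chars.upper sp).take (sp.length - 4) ++ ['/'] ++
                (PySem.Chars.upper sp).drop (sp.length - 4) := by
          unfold pvJoin
          rw [pv_slice_to4, hul, hB4]
        by_cases hm4 : (PySem.Chars.upper sp).drop (sp.length - 4)
            ∈ ["USDT".toList, "BUSD".toList, "USDC".toList]
        case pos =>
          -- the 4-char suffix is one of the 4-char quotes: both split there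
          rw [pv_loopA_cons_true sp _ _ (by
            rw [ht4, pvQuotesA_eq]
            simp only [List.mem_cons, List.not_mem_nil, or_false]
            have := hm4
            simp only [List.mem_cons, List.not_mem_nil, or_false] at this
            rcases this with he | he | he
            · exact Or.inl (by simpa using he)
            · exact Or.inr (Or.inr (Or.inl (by simpa using he)))
            · exact Or.inr (Or.inr (Or.inr (by simpa using he))))]
          rw [if_pos ⟨by rw [hnl]; omega, by rw [hB4]; exact hm4⟩, hBjoin, ht4, hABtake]
        case neg =>
          -- no 4-char quote matches either: the rest of A's scan finds nothing
          rw [pv_loopA_cons_false sp _ _ (by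
            rw [ht4, pvQuotesA_eq]
            intro hmem
            simp only [List.mem_cons, List.not_mem_nil, or_false] at hmem
            apply hm4
            rcases hmem with he | he | he | he
            · simp [he]
            · exact absurd (by rw [he] at hlt4; simp at hlt4) (by omega)
            · simp [he]
            · simp [he])]
          rw [pv_loopA_all_false sp _ (by
            intro i hi
            rw [PySem.List.mem_pyRange_neg_one] at hi
            have hi' : i = ((i.toNat : Nat) : Int) := by omega
            rw [hi']
            exact pv_condA_false sp i.toNat (by omega) (by omega))]
          rw [if_neg (by rintro ⟨-, hs⟩; rw [hB4] at hs; exact hm4 hs)]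

-- ===== VERDICT (by name: the statement is the Claim_ definition above) =====
theorem extract_symbol_from_stream_py_spec : Claim_equal_extract_symbol_from_stream_py := by
  intro stream _
  unfold Spec_extract_symbol_from_stream_py extract_symbol_from_stream_py extract_symbol_from_stream_py_alt
  exact congrArg String.ofList (pv_main _)
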